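-- pv_equiv track=rewrite | github.com/bawejakunal/hackerrank | ctci-connected-cell-in-a-grid.py | dfsGetSize
-- ===== SOURCE A (Python) =====
-- def isValidCell(grid, r, c):
--     return not (r < 0 or r >= len(grid)
--                 or c < 0 or c >= len(grid[r])
--                 or grid[r][c] != 1)
--
-- def dfsGetSize(grid, r, c):
--     if not isValidCell(grid, r, c):
--         return 0
--     s = 1
--     grid[r][c] = -1     # mark visited
--     for y in range(r-1, r+2):
--         for x in range(c-1, c+2):
--             s += dfsGetSize(grid, y, x)
--     return s
-- ===== SOURCE B (Python) =====
-- def dfsGetSize(grid, r, c):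
--     # Iterative flood fill with an explicit LIFO stack instead of recursion.
--     size = 0
--     stack = [(r, c)]
--     while stack:
--         y, x = stack.pop()
--         if 0 <= y < len(grid) and 0 <= x < len(grid[y]) and grid[y][x] == 1:
--             grid[y][x] = -1  # mark visited
--             size += 1
--             # push neighbours in reverse so they are visited in recursion order
--             for ny in range(y + 1, y - 2, -1):
--                 for nx in range(x + 1, x - 2, -1):
--                     stack.append((ny, nx))
--     return size
-- ===== Notes on version B (the rewrite author's own statement) =====
-- stated objective: alternative
-- what changed: Replaces the 9-way recursive DFS with an iterative flood fill driven by an explicit LIFO stack (mark-on-pop, neighbours pushed in reverse), removing recursion entirely.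
import Mathlib
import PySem

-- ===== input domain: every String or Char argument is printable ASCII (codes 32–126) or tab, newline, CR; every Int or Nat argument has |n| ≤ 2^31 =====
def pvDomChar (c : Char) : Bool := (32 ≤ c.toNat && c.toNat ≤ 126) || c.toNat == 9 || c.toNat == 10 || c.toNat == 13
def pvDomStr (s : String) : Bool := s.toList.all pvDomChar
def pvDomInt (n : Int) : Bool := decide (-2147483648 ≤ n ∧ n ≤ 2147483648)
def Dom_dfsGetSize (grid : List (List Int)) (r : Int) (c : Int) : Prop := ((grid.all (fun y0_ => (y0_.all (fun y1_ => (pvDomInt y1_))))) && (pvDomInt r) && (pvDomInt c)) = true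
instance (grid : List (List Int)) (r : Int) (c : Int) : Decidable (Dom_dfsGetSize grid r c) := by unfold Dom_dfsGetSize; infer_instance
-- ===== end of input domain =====

-- B replaces the 9-way recursive DFS with an iterative explicit-stack flood fill (alternative
-- decomposition, same cost). Both Pythons mutate `grid` in place identically; the equivalence
-- proved here is about the RETURN value (the ports thread the grid functionally).

-- ===== PORT A =====
-- shared primitives: grid cell test, in-place mark, and the count of 1-cells (used as fuel /
-- termination measure; a literal recursion on the grid cannot be accepted by Lean otherwise)
def ones : List (List Int) → Nat
  | [] => 0
  | row :: t => row.count 1 + ones t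

-- A's isValidCell helper, literally (short-circuit: grid[r] is only read when 0 ≤ r < len(grid))
def isValidCell (grid : List (List Int)) (r : Int) (c : Int) : Bool :=
  !(decide (r < 0) || decide ((grid.length : Int) ≤ r) || decide (c < 0)
    || decide (((grid.getD r.toNat []).length : Int) ≤ c)
    || decide ((grid.getD r.toNat []).getD c.toNat 0 ≠ 1))

-- grid[r][c] = -1
def mark (grid : List (List Int)) (r : Int) (c : Int) : List (List Int) :=
  grid.set r.toNat ((grid.getD r.toNat []).set c.toNat (-1))

-- neighbour list of A's nested `for y in range(r-1, r+2): for x in range(c-1, c+2)`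
def nbrs (r : Int) (c : Int) : List (Int × Int) :=
  (PySem.List.pyRange (r - 1) (r + 2) 1).flatMap (fun y =>
    (PySem.List.pyRange (c - 1) (c + 2) 1).map (fun x => (y, x)))

-- A's recursion, fuel-guarded for totality (fuel = ones grid + 1 always suffices: every valid
-- call marks a 1-cell before recursing, so valid calls nest at most `ones grid` deep)
def dfsAux (fuel : Nat) (g : List (List Int)) (r : Int) (c : Int) : Int × List (List Int) :=
  match fuel with
  | 0 => (0, g)
  | fuel + 1 =>
    if isValidCell g r c then
      (nbrs r c).foldl
        (fun st p =>
          let res := dfsAux fuel st.2 p.1 p.2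
          (st.1 + res.1, res.2)) (1, mark g r c)
    else (0, g)

def dfsGetSize (grid : List (List Int)) (r : Int) (c : Int) : Int :=
  (dfsAux (ones grid + 1) grid r c).1

-- ===== PORT B =====
-- B's inline bounds-and-value test `0 <= y < len(grid) and 0 <= x < len(grid[y]) and grid[y][x] == 1`
def validB (g : List (List Int)) (y : Int) (x : Int) : Bool :=
  decide (0 ≤ y) && decide (y < (g.length : Int)) && decide (0 ≤ x)
    && decide (x < ((g.getD y.toNat []).length : Int))
    && decide ((g.getD y.toNat []).getD x.toNat 0 = 1)

-- the two tests coincide (needed by stackRun's termination proof below)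
theorem validB_eq_isValidCell (g : List (List Int)) (y x : Int) :
    validB g y x = isValidCell g y x := by
  simp only [validB, isValidCell, Bool.not_or, ← decide_not]
  refine congrArg₂ (· && ·) (congrArg₂ (· && ·) (congrArg₂ (· && ·)
    (congrArg₂ (· && ·) ?_ ?_) ?_) ?_) ?_ <;> exact decide_eq_decide.mpr (by omega)

-- B's reverse-order neighbour pushes; the Python stack's TOP is the Lean list's HEAD, so
-- `stack.append` is cons
def pushNbrs (y : Int) (x : Int) (stack : List (Int × Int)) : List (Int × Int) :=
  (PySem.List.pyRange (y + 1) (y - 2) (-1)).foldl (fun st ny =>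
    (PySem.List.pyRange (x + 1) (x - 2) (-1)).foldl (fun st2 nx => (ny, nx) :: st2) st) stack

-- facts the termination argument of stackRun needs (cited by decreasing_by)
theorem count_set_lt (row : List Int) (j : Nat) (hj : j < row.length)
    (h1 : row.getD j 0 = 1) : (row.set j (-1)).count 1 < row.count 1 := by
  induction row generalizing j with
  | nil => simp at hj
  | cons a t ih =>
    cases j with
    | zero =>
      simp only [List.getD_cons_zero] at h1
      subst h1
      simp
    | succ j =>
      simp only [List.getD_cons_succ] at h1
      have := ih j (by simpa using hj) h1
      simp only [List.set, List.count_cons]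
      split_ifs <;> omega

theorem ones_set_lt (g : List (List Int)) (i j : Nat) (hi : i < g.length)
    (hj : j < (g.getD i []).length) (h1 : (g.getD i []).getD j 0 = 1) :
    ones (g.set i ((g.getD i []).set j (-1))) < ones g := by
  induction g generalizing i with
  | nil => simp at hi
  | cons row t ih =>
    cases i with
    | zero =>
      simp only [List.getD_cons_zero] at hj h1 ⊢
      simp only [List.set, ones]
      have := count_set_lt row j hj h1
      omega
    | succ i =>
      simp only [List.getD_cons_succ] at hj h1 ⊢
      simp only [List.set, ones]
      have := ih i (by simpa using hi) hj h1
      omega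

theorem ones_mark_lt (g : List (List Int)) (r c : Int) (h : isValidCell g r c = true) :
    ones (mark g r c) < ones g := by
  simp only [isValidCell, Bool.not_eq_eq_eq_not, Bool.not_true, Bool.or_eq_false_iff,
    decide_eq_false_iff_not, not_lt, not_le, not_not] at h
  obtain ⟨⟨⟨⟨h0, h1⟩, h2⟩, h3⟩, h4⟩ := h
  exact ones_set_lt g r.toNat c.toNat (by omega) (by omega) h4

-- B's while-loop as well-founded recursion: each pop either marks a 1-cell (ones drops) or
-- shrinks the stack
def stackRun (g : List (List Int)) (stack : List (Int × Int)) (size : Int) : Int :=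
  match stack with
  | [] => size
  | (y, x) :: rest =>
    if h : validB g y x then
      stackRun (mark g y x) (pushNbrs y x rest) (size + 1)
    else
      stackRun g rest size
termination_by (ones g, stack.length)
decreasing_by
  · exact Prod.Lex.left _ _ (ones_mark_lt g y x ((validB_eq_isValidCell g y x) ▸ h))
  · exact Prod.Lex.right _ (by simp)

def dfsGetSize_alt (grid : List (List Int)) (r : Int) (c : Int) : Int :=
  stackRun grid [(r, c)] 0

-- ===== PRECONDITION & SPEC =====
def Spec_dfsGetSize (grid : List (List Int)) (r : Int) (c : Int) (out : Int) : Prop := out = dfsGetSize_alt grid r c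
instance (grid : List (List Int)) (r : Int) (c : Int) (out : Int) : Decidable (Spec_dfsGetSize grid r c out) := by unfold Spec_dfsGetSize; infer_instance

-- ===== CLAIM (what is proved, stated in full; the proofs are below) =====
def Claim_equal_dfsGetSize : Prop := ∀ (grid : List (List Int)) (r : Int) (c : Int), Dom_dfsGetSize grid r c → Spec_dfsGetSize grid r c (dfsGetSize grid r c)

-- ===== LEMMAS AND PROOFS =====

-- A's neighbour loop as a list-processing function (definitionally A's foldl)
def dfsCells (fuel : Nat) (st : Int × List (List Int)) (cells : List (Int × Int)) :
    Int × List (List Int) :=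
  cells.foldl (fun st p =>
    let res := dfsAux fuel st.2 p.1 p.2
    (st.1 + res.1, res.2)) st

theorem dfsCells_nil (fuel : Nat) (st : Int × List (List Int)) : dfsCells fuel st [] = st := rfl

theorem dfsCells_cons (fuel : Nat) (st : Int × List (List Int)) (y x : Int)
    (t : List (Int × Int)) :
    dfsCells fuel st ((y, x) :: t)
      = dfsCells fuel (st.1 + (dfsAux fuel st.2 y x).1, (dfsAux fuel st.2 y x).2) t := rfl

theorem dfsAux_succ_valid (fuel : Nat) (g : List (List Int)) (r c : Int)
    (h : isValidCell g r c = true) :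
    dfsAux (fuel + 1) g r c = dfsCells fuel (1, mark g r c) (nbrs r c) := by
  simp [dfsAux, h, dfsCells]

theorem dfsAux_succ_invalid (fuel : Nat) (g : List (List Int)) (r c : Int)
    (h : ¬ isValidCell g r c = true) :
    dfsAux (fuel + 1) g r c = (0, g) := by
  simp [dfsAux, h]

-- the shift lemma: the Int accumulator of dfsCells is a pure offset
theorem dfsCells_shift (fuel : Nat) (cells : List (Int × Int)) :
    ∀ (a s : Int) (g : List (List Int)),
      dfsCells fuel (a + s, g) cells
        = (a + (dfsCells fuel (s, g) cells).1, (dfsCells fuel (s, g) cells).2) := by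
  induction cells with
  | nil => intro a s g; simp [dfsCells_nil]
  | cons p t ih =>
    intro a s g
    obtain ⟨y, x⟩ := p
    rw [dfsCells_cons, dfsCells_cons]
    simp only
    rw [add_assoc, ih]

-- monotonicity: the grid returned by A's recursion never has more 1-cells than the input
theorem cells_mono (fuel : Nat)
    (hmono : ∀ g r c, ones (dfsAux fuel g r c).2 ≤ ones g) :
    ∀ (cells : List (Int × Int)) (s : Int) (g : List (List Int)),
      ones (dfsCells fuel (s, g) cells).2 ≤ ones g := by
  intro cells
  induction cells with
  | nil => intro s g; simp [dfsCells_nil]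
  | cons p t ih =>
    intro s g
    obtain ⟨y, x⟩ := p
    rw [dfsCells_cons]
    exact le_trans (ih _ _) (hmono g y x)

theorem aux_mono : ∀ (fuel : Nat) (g : List (List Int)) (r c : Int),
    ones (dfsAux fuel g r c).2 ≤ ones g := by
  intro fuel
  induction fuel with
  | zero => intro g r c; simp [dfsAux]
  | succ fuel ih =>
    intro g r c
    by_cases h : isValidCell g r c = true
    · rw [dfsAux_succ_valid fuel g r c h]
      exact le_trans (cells_mono fuel ih (nbrs r c) 1 (mark g r c))
        (le_of_lt (ones_mark_lt g r c h))
    · rw [dfsAux_succ_invalid fuel g r c h]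

-- pyRange computations for the two 3-element ranges
theorem pyRange3 (a : Int) : PySem.List.pyRange (a - 1) (a + 2) 1 = [a - 1, a, a + 1] := by
  rw [PySem.List.pyRange_one_cons (by omega), show a - 1 + 1 = a by ring,
    PySem.List.pyRange_one_cons (by omega),
    PySem.List.pyRange_one_cons (by omega), show a + 1 + 1 = a + 2 by ring,
    PySem.List.pyRange_one_eq_nil (by omega)]

theorem pyRange3down (a : Int) : PySem.List.pyRange (a + 1) (a - 2) (-1) = [a + 1, a, a - 1] := by
  rw [PySem.List.pyRange_neg_one_cons (by omega), show a + 1 - 1 = a by ring,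
    PySem.List.pyRange_neg_one_cons (by omega),
    PySem.List.pyRange_neg_one_cons (by omega), show a - 1 - 1 = a - 2 by ring,
    PySem.List.pyRange_neg_one_eq_nil (by omega)]

-- B's reverse-order pushes put exactly A's forward-order neighbour list on top of the stack
theorem pushNbrs_eq (y x : Int) (st : List (Int × Int)) :
    pushNbrs y x st = nbrs y x ++ st := by
  unfold pushNbrs nbrs
  rw [pyRange3down y, pyRange3down x, pyRange3 y, pyRange3 x]
  simp [List.foldl, List.flatMap]

theorem stackRun_nil (g : List (List Int)) (size : Int) : stackRun g [] size = size := by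
  rw [stackRun]

theorem stackRun_cons_valid (g : List (List Int)) (y x : Int) (rest : List (Int × Int))
    (size : Int) (h : isValidCell g y x = true) :
    stackRun g ((y, x) :: rest) size = stackRun (mark g y x) (pushNbrs y x rest) (size + 1) := by
  rw [stackRun]
  simp [validB_eq_isValidCell, h]

theorem stackRun_cons_invalid (g : List (List Int)) (y x : Int) (rest : List (Int × Int))
    (size : Int) (h : ¬ isValidCell g y x = true) :
    stackRun g ((y, x) :: rest) size = stackRun g rest size := by
  rw [stackRun]
  simp [validB_eq_isValidCell, h]

-- the central worklist/recursion correspondence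
theorem stack_eq_dfs : ∀ (n : Nat) (g : List (List Int)), ones g ≤ n →
    ∀ (fuel : Nat), ones g < fuel →
    ∀ (cells rest : List (Int × Int)) (size : Int),
      stackRun g (cells ++ rest) size
        = stackRun (dfsCells fuel (size, g) cells).2 rest (dfsCells fuel (size, g) cells).1 := by
  intro n
  induction n using Nat.strong_induction_on with
  | _ n IH =>
    intro g hg fuel hfuel cells
    induction cells with
    | nil => intro rest size; simp [dfsCells_nil]
    | cons p t iht =>
      intro rest size
      obtain ⟨y, x⟩ := p
      obtain ⟨f, rfl⟩ : ∃ f, fuel = f + 1 := ⟨fuel - 1, by omega⟩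
      by_cases h : isValidCell g y x = true
      · rw [List.cons_append, stackRun_cons_valid g y x (t ++ rest) size h,
          pushNbrs_eq]
        have h1 : ones (mark g y x) < ones g := ones_mark_lt g y x h
        -- first IH use: run the nine neighbours
        rw [IH (ones (mark g y x)) (by omega) (mark g y x) le_rfl f (by omega)
          (nbrs y x) (t ++ rest) (size + 1)]
        have hsh := dfsCells_shift f (nbrs y x) size 1 (mark g y x)
        rw [hsh]
        -- second IH use: run the rest of the worklist
        set res := dfsCells f (1, mark g y x) (nbrs y x) with hres
        have h2 : ones res.2 ≤ ones (mark g y x) := by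
          rw [hres]; exact cells_mono f (fun g r c => aux_mono f g r c) _ _ _
        rw [IH (ones res.2) (by omega) res.2 le_rfl (f + 1) (by omega) t rest (size + res.1)]
        rw [dfsCells_cons, dfsAux_succ_valid f g y x h, ← hres]
      · rw [List.cons_append, stackRun_cons_invalid g y x (t ++ rest) size h]
        rw [dfsCells_cons, dfsAux_succ_invalid f g y x h]
        simpa using iht rest size

-- ===== VERDICT (by name: the statement is the Claim_ definition above) =====
theorem dfsGetSize_spec : Claim_equal_dfsGetSize := by
  intro grid r c _
  unfold Spec_dfsGetSize dfsGetSize dfsGetSize_alt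
  have := stack_eq_dfs (ones grid) grid le_rfl (ones grid + 1) (by omega)
    [(r, c)] [] 0
  rw [List.cons_append, List.nil_append] at this
  rw [this, dfsCells_cons, dfsCells_nil, stackRun_nil]
  simp
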